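-- pv_equiv track=rewrite | github.com/Hackathonv2/RandomLogicT5 | ex3/ex3.py | get_weight_node
-- ===== SOURCE A (Python) =====
-- def get_weight_node(tree: dict, node: str):
--     if not (node in tree.keys()):
--         return 1
--     else:
--         weight = 1
--         for module in tree[node]:
--             weight += get_weight_node(tree, module)
--         return weight
-- ===== SOURCE B (Python) =====
-- def get_weight_node(tree: dict, node: str):
--     cache = {}
--
--     def weight(n):
--         if n not in tree:
--             return 1
--         if n in cache:
--             return cache[n]
--         w = 1
--         for module in tree[n]:
--             w += weight(module)
--         cache[n] = w
--         return w
--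
--     return weight(node)
-- ===== Notes on version B (the rewrite author's own statement) =====
-- stated objective: alternative
-- what changed: B computes the weight with a memoized traversal that caches each key's subtree weight in a dict, so every key's weight is computed once, instead of A's plain recursion that recomputes shared subtrees.
import Mathlib
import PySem

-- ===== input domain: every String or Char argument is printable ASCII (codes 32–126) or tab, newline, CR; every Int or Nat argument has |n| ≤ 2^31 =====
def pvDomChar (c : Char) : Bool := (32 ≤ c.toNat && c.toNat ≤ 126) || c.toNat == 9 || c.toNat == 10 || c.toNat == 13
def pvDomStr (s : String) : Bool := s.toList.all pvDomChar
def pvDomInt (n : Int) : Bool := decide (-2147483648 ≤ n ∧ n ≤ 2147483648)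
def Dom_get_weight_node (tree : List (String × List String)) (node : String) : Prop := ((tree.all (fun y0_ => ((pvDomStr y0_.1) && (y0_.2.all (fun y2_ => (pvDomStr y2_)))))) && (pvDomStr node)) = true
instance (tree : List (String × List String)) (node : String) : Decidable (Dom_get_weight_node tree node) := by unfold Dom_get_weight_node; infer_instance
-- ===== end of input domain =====

-- B memoizes each key's subtree weight in a dict cache (each key computed once) instead of
-- A's plain recursion, which recomputes shared subtrees (objective: alternative algorithm).
-- Both recursions are ported with a fuel counter tree.length+1; Pre_ (acyclicity of the
-- part of the graph reachable from node) is exactly where the Python A returns, and there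
-- the fuel is never exhausted.

-- first-match association-list lookup = Python 'tree[n]' / 'n in tree.keys()' (dict keys are unique)
def pvLookup : List (String × List String) → String → Option (List String)
  | [], _ => none
  | (k, v) :: rest, n => if k == n then some v else pvLookup rest n

-- ===== PORT A =====
def pvGoA (tree : List (String × List String)) : Nat → String → Int
  | 0, _ => 0   -- fuel guard only; unreachable under Pre_get_weight_node
  | fuel + 1, node =>
    match pvLookup tree node with
    | none => 1
    | some mods => mods.foldl (fun weight module => weight + pvGoA tree fuel module) 1

def get_weight_node (tree : List (String × List String)) (node : String) : Int :=
  pvGoA tree (tree.length + 1) node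

-- ===== PORT B =====
def pvGoB (tree : List (String × List String)) :
    Nat → String → PySem.Dict String Int → Int × PySem.Dict String Int
  | 0, _, c => (0, c)   -- fuel guard only; unreachable under Pre_get_weight_node
  | fuel + 1, n, c =>
    match pvLookup tree n with
    | none => (1, c)                -- 'if n not in tree: return 1'
    | some mods =>
      match c.get? n with
      | some w => (w, c)            -- 'if n in cache: return cache[n]'
      | none =>
        let r := mods.foldl
          (fun (p : Int × PySem.Dict String Int) m =>
            let q := pvGoB tree fuel m p.2
            (p.1 + q.1, q.2)) (1, c)
        (r.1, r.2.insert n r.1)     -- 'cache[n] = w; return w'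

def get_weight_node_alt (tree : List (String × List String)) (node : String) : Int :=
  (pvGoB tree (tree.length + 1) node PySem.Dict.empty).1

-- ===== PRECONDITION & SPEC =====
-- successors of a node in the dependency graph (leaves / non-keys have none)
def pvSuccs (tree : List (String × List String)) (k : String) : List String :=
  (((tree.find? (fun p => p.1 == k)).map Prod.snd).getD [])

def pvStep (tree : List (String × List String)) (S : List String) : List String :=
  (S ++ S.flatMap (fun k => pvSuccs tree k)).dedup

def pvReach (tree : List (String × List String)) : Nat → List String → List String
  | 0, S => S
  | n + 1, S => pvReach tree n (pvStep tree S)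

-- Pre_: no key reachable from node lies on a dependency cycle (tree.length+1 closure steps
-- reach every node A's recursion can visit).  On exactly the excluded inputs the Python A
-- recurses forever (RecursionError); it returns on every input satisfying Pre_.
def Pre_get_weight_node (tree : List (String × List String)) (node : String) : Prop :=
  ∀ k ∈ pvReach tree (tree.length + 1) [node],
    k ∈ tree.map Prod.fst → k ∉ pvReach tree (tree.length + 1) (pvSuccs tree k)

instance (tree : List (String × List String)) (node : String) : Decidable (Pre_get_weight_node tree node) := by
  unfold Pre_get_weight_node; infer_instance

def pvWitness_get_weight_node : (List (String × List String)) × String :=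
  ([("a", ["b", "b", "c"]), ("b", ["c"]), ("c", [])], "a")

def Spec_get_weight_node (tree : List (String × List String)) (node : String) (out : Int) : Prop := out = get_weight_node_alt tree node
instance (tree : List (String × List String)) (node : String) (out : Int) : Decidable (Spec_get_weight_node tree node out) := by unfold Spec_get_weight_node; infer_instance

-- ===== CLAIM (what is proved, stated in full; the proofs are below) =====
def Claim_equal_get_weight_node : Prop := ∀ (tree : List (String × List String)) (node : String), Dom_get_weight_node tree node → Pre_get_weight_node tree node → Spec_get_weight_node tree node (get_weight_node tree node)

-- ===== LEMMAS AND PROOFS =====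

lemma pvLookup_mem_keys {tree : List (String × List String)} {n : String} {ms : List String}
    (h : pvLookup tree n = some ms) : n ∈ tree.map Prod.fst := by
  induction tree with
  | nil => simp [pvLookup] at h
  | cons p rest ih =>
    obtain ⟨k, v⟩ := p
    by_cases hk : k == n
    · simp only [List.map_cons, List.mem_cons]; exact Or.inl (beq_iff_eq.mp hk).symm
    · simp [pvLookup, hk] at h
      simp only [List.map_cons, List.mem_cons]; exact Or.inr (ih h)

lemma pvSuccs_eq_lookup (tree : List (String × List String)) (k : String) :
    pvSuccs tree k = (pvLookup tree k).getD [] := by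
  induction tree with
  | nil => rfl
  | cons p rest ih =>
    obtain ⟨a, b⟩ := p
    by_cases hk : a == k
    · simp [pvSuccs, pvLookup, hk]
    · simpa [pvSuccs, pvLookup, List.find?_cons, hk] using ih

lemma mem_pvStep_self {tree : List (String × List String)} {S : List String} {x : String}
    (h : x ∈ S) : x ∈ pvStep tree S := by
  unfold pvStep; rw [List.mem_dedup]; exact List.mem_append_left _ h

lemma mem_pvStep_of_succ {tree : List (String × List String)} {S : List String} {s m : String}
    (hs : s ∈ S) (hm : m ∈ pvSuccs tree s) : m ∈ pvStep tree S := by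
  unfold pvStep; rw [List.mem_dedup]
  exact List.mem_append_right _ (List.mem_flatMap.mpr ⟨s, hs, hm⟩)

lemma pvReach_succ_right (tree : List (String × List String)) (n : Nat) (S : List String) :
    pvReach tree (n + 1) S = pvStep tree (pvReach tree n S) := by
  induction n generalizing S with
  | zero => rfl
  | succ n ih => show pvReach tree (n+1) (pvStep tree S) = _; rw [ih]; rfl

lemma mem_pvReach_self {tree : List (String × List String)} {S : List String} {x : String}
    (h : x ∈ S) (n : Nat) : x ∈ pvReach tree n S := by
  induction n generalizing S with
  | zero => exact h
  | succ n ih => exact ih (mem_pvStep_self h)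

lemma mem_pvReach_step {tree : List (String × List String)} {S : List String} {s m : String} {n : Nat}
    (hs : s ∈ pvReach tree n S) (hm : m ∈ pvSuccs tree s) : m ∈ pvReach tree (n + 1) S := by
  rw [pvReach_succ_right]; exact mem_pvStep_of_succ hs hm

lemma mem_pvReach_mono_fuel {tree : List (String × List String)} {S : List String} {x : String}
    {n n' : Nat} (h : x ∈ pvReach tree n S) (hle : n ≤ n') : x ∈ pvReach tree n' S := by
  induction n' with
  | zero => have : n = 0 := Nat.le_zero.mp hle; exact this ▸ h
  | succ n' ih =>
    rcases Nat.lt_or_ge n (n' + 1) with hlt | hge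
    · rw [pvReach_succ_right]; exact mem_pvStep_self (ih (Nat.lt_succ_iff.mp hlt))
    · have : n = n' + 1 := Nat.le_antisymm hle hge
      exact this ▸ h

-- a recursion chain of A: seen = the keys on the call stack (innermost first), rooted at node
inductive pvChain (tree : List (String × List String)) (node : String) : List String → String → Prop
  | nil : pvChain tree node [] node
  | cons {s : String} {l : List String} {m : String} :
      m ∈ pvSuccs tree s → pvChain tree node l s → pvChain tree node (s :: l) m

lemma pvChain_reach {tree : List (String × List String)} {node : String} {seen : List String}
    {n : String} (h : pvChain tree node seen n) : n ∈ pvReach tree seen.length [node] := by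
  induction h with
  | nil => exact mem_pvReach_self (by simp) 0
  | cons hm _ ih => exact mem_pvReach_step ih hm

lemma pvChain_cycle {tree : List (String × List String)} {node : String} {seen : List String}
    {n : String} (h : pvChain tree node seen n) :
    ∀ s ∈ seen, ∃ d, d ≤ seen.length ∧ n ∈ pvReach tree d (pvSuccs tree s) := by
  induction h with
  | nil => intro s hs; simp at hs
  | @cons s l m hm hch ih =>
    intro s' hs'
    rcases List.mem_cons.mp hs' with rfl | hs'
    · exact ⟨0, by simp, hm⟩
    · obtain ⟨d, hd, hmem⟩ := ih s' hs'
      exact ⟨d + 1, by simpa using Nat.succ_le_succ hd, mem_pvReach_step hmem hm⟩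

-- 'Terms tree fuel n' = A's recursion from n completes within the given fuel
inductive pvTerms (tree : List (String × List String)) : Nat → String → Prop
  | leaf {f : Nat} {n : String} : pvLookup tree n = none → pvTerms tree (f + 1) n
  | node {f : Nat} {n : String} {ms : List String} : pvLookup tree n = some ms →
      (∀ m ∈ ms, pvTerms tree f m) → pvTerms tree (f + 1) n

lemma goA_stable {tree : List (String × List String)} {f : Nat} {n : String}
    (h : pvTerms tree f n) : ∀ f', pvTerms tree f' n →
    pvGoA tree f n = pvGoA tree f' n := by
  induction h with
  | @leaf f n hn =>
    intro f' h'
    cases h' with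
    | leaf h'' => simp [pvGoA, hn]
    | node h'' => rw [hn] at h''; cases h''
  | @node f n ms hn hms ih =>
    intro f' h'
    cases h' with
    | leaf h'' => rw [hn] at h''; cases h''
    | @node f'' _ ms' h'' hms' =>
      rw [hn] at h''; injection h'' with h''; subst h''
      simp only [pvGoA, hn]
      exact PySem.List.foldl_congr_mem _ _ _ _ (fun acc m hm => by rw [ih m hm f'' (hms' m hm)])

lemma pvTerms_of_pre {tree : List (String × List String)} {node : String}
    (hpre : Pre_get_weight_node tree node) :
    ∀ fuel seen n, pvChain tree node seen n → seen.Nodup →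
      (∀ s ∈ seen, s ∈ tree.map Prod.fst) →
      fuel + seen.length = tree.length + 1 → pvTerms tree fuel n := by
  intro fuel
  induction fuel with
  | zero =>
    intro seen n _ hnd hkeys hlen
    exfalso
    have hsub : seen ⊆ tree.map Prod.fst := hkeys
    have := (hnd.subperm hsub).length_le
    rw [List.length_map] at this
    omega
  | succ fuel ih =>
    intro seen n hch hnd hkeys hlen
    cases hlook : pvLookup tree n with
    | none => exact pvTerms.leaf hlook
    | some ms =>
      have hreach : n ∈ pvReach tree (tree.length + 1) [node] :=
        mem_pvReach_mono_fuel (pvChain_reach hch) (by omega)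
      have hnot : n ∉ pvReach tree (tree.length + 1) (pvSuccs tree n) :=
        hpre n hreach (pvLookup_mem_keys hlook)
      have hnseen : n ∉ seen := by
        intro hin
        obtain ⟨d, hd, hmem⟩ := pvChain_cycle hch n hin
        exact hnot (mem_pvReach_mono_fuel hmem (by omega))
      refine pvTerms.node hlook (fun m hm => ?_)
      refine ih (n :: seen) m (pvChain.cons ?_ hch) (List.nodup_cons.mpr ⟨hnseen, hnd⟩) ?_ ?_
      · rw [pvSuccs_eq_lookup, hlook]; exact hm
      · intro s hs
        rcases List.mem_cons.mp hs with rfl | hs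
        · exact pvLookup_mem_keys hlook
        · exact hkeys s hs
      · simpa using by omega
      
-- the cache invariant: every cached value is the (fuel-independent) weight of its key
def pvGood (tree : List (String × List String)) (c : PySem.Dict String Int) : Prop :=
  ∀ k v, c.get? k = some v → ∃ g, pvTerms tree g k ∧ pvGoA tree g k = v

lemma memo_go {tree : List (String × List String)} {fuel : Nat} {n : String}
    (hT : pvTerms tree fuel n) :
    ∀ c, pvGood tree c →
      (pvGoB tree fuel n c).1 = pvGoA tree fuel n ∧
      pvGood tree (pvGoB tree fuel n c).2 := by
  induction hT with
  | @leaf f n hn =>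
    intro c hG
    constructor
    · simp [pvGoB, pvGoA, hn]
    · simpa [pvGoB, hn] using hG
  | @node f n ms hn hms ih =>
    intro c hG
    cases hc : c.get? n with
    | some w =>
      obtain ⟨g, hg, hv⟩ := hG n w hc
      have hw : w = pvGoA tree (f + 1) n :=
        hv ▸ goA_stable hg (f + 1) (pvTerms.node hn hms)
      constructor
      · simp [pvGoB, hn, hc, hw]
      · simpa [pvGoB, hn, hc] using hG
    | none =>
      have key : ∀ (l : List String), (∀ m ∈ l, m ∈ ms) → ∀ (acc : Int) (c : PySem.Dict String Int),
          pvGood tree c →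
          (l.foldl (fun (p : Int × PySem.Dict String Int) m =>
              let q := pvGoB tree f m p.2
              (p.1 + q.1, q.2)) (acc, c)).1
            = l.foldl (fun w m => w + pvGoA tree f m) acc ∧
          pvGood tree ((l.foldl (fun (p : Int × PySem.Dict String Int) m =>
              let q := pvGoB tree f m p.2
              (p.1 + q.1, q.2)) (acc, c)).2) := by
        intro l
        induction l with
        | nil => intro _ acc c hGc; exact ⟨rfl, hGc⟩
        | cons m l ihl =>
          intro hsub acc c hGc
          have hm := hsub m (by simp)
          obtain ⟨h1, h2⟩ := ih m hm c hGc
          simp only [List.foldl_cons]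
          have this0 := ihl (fun x hx => hsub x (by simp [hx])) (acc + (pvGoB tree f m c).1) (pvGoB tree f m c).2 h2
          refine ⟨?_, this0.2⟩
          rw [this0.1, h1]
      obtain ⟨h1, h2⟩ := key ms (fun _ h => h) 1 c hG
      constructor
      · simp only [pvGoB, pvGoA, hn, hc]
        exact h1
      · simp only [pvGoB, hn, hc]
        intro k v hkv
        rw [PySem.Dict.get?_insert] at hkv
        split at hkv
        · rename_i heq
          injection hkv with hkv
          subst heq
          refine ⟨f + 1, pvTerms.node hn hms, ?_⟩
          rw [← hkv, h1]
          simp [pvGoA, hn]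
        · exact h2 k v hkv

lemma pvGood_empty (tree : List (String × List String)) : pvGood tree PySem.Dict.empty := by
  intro k v h
  simp [PySem.Dict.get?_empty] at h

-- ===== VERDICT (by name: the statement is the Claim_ definition above) =====
theorem get_weight_node_spec : Claim_equal_get_weight_node := by
  intro tree node _ hpre
  unfold Spec_get_weight_node get_weight_node get_weight_node_alt
  have hT : pvTerms tree (tree.length + 1) node :=
    pvTerms_of_pre hpre (tree.length + 1) [] node pvChain.nil (by simp) (by simp) (by simp)
  exact ((memo_go hT PySem.Dict.empty (pvGood_empty tree)).1).symm
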